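-- pv_equiv track=rewrite | github.com/damianTrybuszek/BattleShip- | battleship.py | is_in_the_board
-- ===== SOURCE A (Python) =====
-- def is_in_the_board(row, col, ship_len, user_input_orientation, coordinates):
--     temp_row = row
--     temp_col = col
--     for i in range(ship_len):
--         if (temp_row, temp_col) not in coordinates.values():
--             return False
--         if user_input_orientation.lower() == "h" and (temp_row, temp_col) in coordinates.values():
--             temp_col += 1
--         if user_input_orientation.lower() == "v" and (temp_row, temp_col) in coordinates.values():
--             temp_row += 1
--     return True
-- ===== SOURCE B (Python) =====
-- def is_in_the_board(row, col, ship_len, user_input_orientation, coordinates):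
--     if ship_len <= 0:
--         return True
--     o = user_input_orientation.lower()
--     if o == "h":
--         covered = {v[1] - col for v in coordinates.values()
--                    if len(v) == 2 and v[0] == row and 0 <= v[1] - col < ship_len}
--         return len(covered) == ship_len
--     if o == "v":
--         covered = {v[0] - row for v in coordinates.values()
--                    if len(v) == 2 and v[1] == col and 0 <= v[0] - row < ship_len}
--         return len(covered) == ship_len
--     return (row, col) in coordinates.values()
-- ===== Notes on version B (the rewrite author's own statement) =====
-- stated objective: alternative
-- what changed: B inverts the iteration: instead of walking ship_len cursor steps each scanning coordinates.values(), it makes one pass over the values collecting the distinct in-range ship offsets into a hash set and compares the set's size with ship_len (with a single direct membership check in the trivial ship_len<=0 and unknown-orientation cases).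
import Mathlib
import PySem

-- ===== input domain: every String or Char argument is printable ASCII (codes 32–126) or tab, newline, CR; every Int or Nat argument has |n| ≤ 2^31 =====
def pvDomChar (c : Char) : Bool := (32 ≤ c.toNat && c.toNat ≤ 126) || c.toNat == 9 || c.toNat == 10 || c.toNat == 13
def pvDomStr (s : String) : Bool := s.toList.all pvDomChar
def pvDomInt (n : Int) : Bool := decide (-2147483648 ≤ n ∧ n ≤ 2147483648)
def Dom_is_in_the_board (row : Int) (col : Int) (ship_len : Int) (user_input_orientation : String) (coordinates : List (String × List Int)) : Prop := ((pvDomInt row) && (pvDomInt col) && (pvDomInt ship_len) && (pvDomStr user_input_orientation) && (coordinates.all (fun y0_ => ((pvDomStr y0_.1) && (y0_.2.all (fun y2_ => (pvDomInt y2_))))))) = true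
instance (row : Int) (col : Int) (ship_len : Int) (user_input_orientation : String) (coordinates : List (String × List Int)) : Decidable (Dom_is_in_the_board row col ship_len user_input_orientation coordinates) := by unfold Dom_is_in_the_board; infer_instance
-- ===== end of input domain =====

-- B inverts the iteration: one pass over coordinates.values() collecting the distinct in-range
-- ship offsets into a set, then compares the set's size with ship_len — instead of A's walk of
-- ship_len cursor steps each scanning the values; a different traversal of the same data.

-- ===== PORT A =====
-- `(temp_row, temp_col) in coordinates.values()` (a value is a tuple of ints, here List Int)
def aTupleInValues (r c : Int) (coordinates : List (String × List Int)) : Bool :=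
  (coordinates.map Prod.snd).any (fun v => [r, c] == v)

-- the `for i in range(ship_len)` loop, carrying temp_row/temp_col
def aLoop (user_input_orientation : String) (coordinates : List (String × List Int)) :
    Nat → Int → Int → Bool
  | 0, _, _ => true
  | n + 1, temp_row, temp_col =>
    if ¬ aTupleInValues temp_row temp_col coordinates = true then false
    else
      let temp_col' :=
        if PySem.Str.lower user_input_orientation = "h" ∧
            aTupleInValues temp_row temp_col coordinates = true then temp_col + 1 else temp_col
      let temp_row' :=
        if PySem.Str.lower user_input_orientation = "v" ∧
            aTupleInValues temp_row temp_col' coordinates = true then temp_row + 1 else temp_row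
      aLoop user_input_orientation coordinates n temp_row' temp_col'

def is_in_the_board (row : Int) (col : Int) (ship_len : Int) (user_input_orientation : String) (coordinates : List (String × List Int)) : Bool :=
  aLoop user_input_orientation coordinates ship_len.toNat row col

-- ===== PORT B =====
-- `{v[1] - col for v in values if len(v)==2 and v[0]==row and 0 <= v[1]-col < ship_len}`:
-- a set comprehension over the values = a fold of its per-element step (the match combines the
-- len(v)==2 guard with the element accesses v[0], v[1]; non-pairs contribute nothing, exactly
-- as in Python where the len(v)==2 test fails)
def stepH (row col ship_len : Int) (s : PySem.Set Int) (v : List Int) : PySem.Set Int :=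
  match v with
  | [r, c] =>
    if r = row ∧ 0 ≤ c - col ∧ c - col < ship_len then PySem.Set.add s (c - col) else s
  | _ => s

def coveredH (row col ship_len : Int) (values : List (List Int)) : PySem.Set Int :=
  values.foldl (stepH row col ship_len) PySem.Set.empty

-- the analogous comprehension step for the vertical orientation (offsets r - row)
def stepV (row col ship_len : Int) (s : PySem.Set Int) (v : List Int) : PySem.Set Int :=
  match v with
  | [r, c] =>
    if c = col ∧ 0 ≤ r - row ∧ r - row < ship_len then PySem.Set.add s (r - row) else s
  | _ => s

def coveredV (row col ship_len : Int) (values : List (List Int)) : PySem.Set Int :=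
  values.foldl (stepV row col ship_len) PySem.Set.empty

def is_in_the_board_alt (row : Int) (col : Int) (ship_len : Int) (user_input_orientation : String) (coordinates : List (String × List Int)) : Bool :=
  if ship_len ≤ 0 then true
  else
    let o := PySem.Str.lower user_input_orientation
    let values := coordinates.map Prod.snd
    if o = "h" then decide (((coveredH row col ship_len values).length : Int) = ship_len)
    else if o = "v" then decide (((coveredV row col ship_len values).length : Int) = ship_len)
    else values.contains [row, col]

-- ===== PRECONDITION & SPEC =====
def Spec_is_in_the_board (row : Int) (col : Int) (ship_len : Int) (user_input_orientation : String) (coordinates : List (String × List Int)) (out : Bool) : Prop := out = is_in_the_board_alt row col ship_len user_input_orientation coordinates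
instance (row : Int) (col : Int) (ship_len : Int) (user_input_orientation : String) (coordinates : List (String × List Int)) (out : Bool) : Decidable (Spec_is_in_the_board row col ship_len user_input_orientation coordinates out) := by unfold Spec_is_in_the_board; infer_instance

-- ===== CLAIM (what is proved, stated in full; the proofs are below) =====
def Claim_equal_is_in_the_board : Prop := ∀ (row : Int) (col : Int) (ship_len : Int) (user_input_orientation : String) (coordinates : List (String × List Int)), Dom_is_in_the_board row col ship_len user_input_orientation coordinates → Spec_is_in_the_board row col ship_len user_input_orientation coordinates (is_in_the_board row col ship_len user_input_orientation coordinates)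

-- ===== LEMMAS AND PROOFS =====

-- membership test characterisation
theorem mem_iff (r c : Int) (co : List (String × List Int)) :
    aTupleInValues r c co = true ↔ [r, c] ∈ co.map Prod.snd := by
  simp [aTupleInValues]

-- one iteration of A's loop advances the cursor by the orientation's (dr, dc)
theorem aLoop_step (o : String) (co : List (String × List Int)) (dr dc : Int)
    (hd : (if PySem.Str.lower o = "h" then ((0 : Int), (1 : Int))
           else if PySem.Str.lower o = "v" then (1, 0) else (0, 0)) = (dr, dc))
    (n : Nat) (r c : Int) :
    aLoop o co (n + 1) r c = (aTupleInValues r c co && aLoop o co n (r + dr) (c + dc)) := by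
  by_cases hm : aTupleInValues r c co = true
  · by_cases hh : PySem.Str.lower o = "h"
    · have hv : ¬ PySem.Str.lower o = "v" := by rw [hh]; decide
      rw [if_pos hh, Prod.mk.injEq] at hd
      obtain ⟨e1, e2⟩ := hd
      subst e1; subst e2
      simp [aLoop, hm, hh]
    · by_cases hvv : PySem.Str.lower o = "v"
      · rw [if_neg hh, if_pos hvv, Prod.mk.injEq] at hd
        obtain ⟨e1, e2⟩ := hd
        subst e1; subst e2
        simp [aLoop, hm, hvv]
      · rw [if_neg hh, if_neg hvv, Prod.mk.injEq] at hd
        obtain ⟨e1, e2⟩ := hd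
        subst e1; subst e2
        simp [aLoop, hm, hh, hvv]
  · simp only [Bool.not_eq_true] at hm
    simp [aLoop, hm]

-- A's loop succeeds iff every cell of the arithmetically-described ship lies among the values
theorem aLoop_iff (o : String) (co : List (String × List Int)) (dr dc : Int)
    (hd : (if PySem.Str.lower o = "h" then ((0 : Int), (1 : Int))
           else if PySem.Str.lower o = "v" then (1, 0) else (0, 0)) = (dr, dc)) :
    ∀ (n : Nat) (r c : Int),
      (aLoop o co n r c = true ↔
        ∀ i ∈ List.range n, [r + dr * (i : Int), c + dc * (i : Int)] ∈ co.map Prod.snd)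
  | 0, r, c => by simp [aLoop]
  | n + 1, r, c => by
    rw [aLoop_step o co dr dc hd n r c, Bool.and_eq_true, mem_iff,
      aLoop_iff o co dr dc hd n (r + dr) (c + dc), List.range_succ_eq_map]
    simp only [List.forall_mem_cons, List.forall_mem_map]
    constructor
    · rintro ⟨h0, h⟩
      refine ⟨by simpa using h0, fun i hi => ?_⟩
      have hcell := h i hi
      have e1 : r + dr * ((i : Int) + 1) = r + dr + dr * (i : Int) := by ring
      have e2 : c + dc * ((i : Int) + 1) = c + dc + dc * (i : Int) := by ring
      simpa [Nat.succ_eq_add_one, e1, e2] using hcell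
    · rintro ⟨h0, h⟩
      refine ⟨by simpa using h0, fun i hi => ?_⟩
      have hcell := h i hi
      have e1 : r + dr * ((i : Int) + 1) = r + dr + dr * (i : Int) := by ring
      have e2 : c + dc * ((i : Int) + 1) = c + dc + dc * (i : Int) := by ring
      simpa [Nat.succ_eq_add_one, e1, e2] using hcell

-- membership in coveredH: exactly the in-range horizontal offsets present among the values
theorem mem_coveredH_aux (row col sl : Int) (values : List (List Int)) :
    ∀ (s : PySem.Set Int) (x : Int),
      (x ∈ values.foldl (stepH row col sl) s ↔
        x ∈ s ∨ (0 ≤ x ∧ x < sl ∧ [row, col + x] ∈ values)) := by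
  induction values with
  | nil => simp
  | cons v vs ih =>
    intro s x
    simp only [List.foldl_cons]
    rw [ih]
    match v with
    | [] => simp [stepH]
    | [a] => simp [stepH]
    | a :: b :: d :: t => simp [stepH]
    | [r, c] =>
      rw [show stepH row col sl s [r, c] =
        if r = row ∧ 0 ≤ c - col ∧ c - col < sl then PySem.Set.add s (c - col) else s from rfl]
      by_cases h : r = row ∧ 0 ≤ c - col ∧ c - col < sl
      · rw [if_pos h, PySem.Set.mem_add]
        obtain ⟨h1, h2, h3⟩ := h
        subst h1
        simp only [List.mem_cons]
        constructor
        · rintro ((hs | he) | hv)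
          · exact Or.inl hs
          · subst he; exact Or.inr ⟨h2, h3, Or.inl (by rw [show col + (c - col) = c by ring])⟩
          · exact Or.inr ⟨hv.1, hv.2.1, Or.inr hv.2.2⟩
        · rintro (hs | ⟨hx1, hx2, (he | hv)⟩)
          · exact Or.inl (Or.inl hs)
          · rw [List.cons.injEq, List.cons.injEq] at he
            exact Or.inl (Or.inr (by omega))
          · exact Or.inr ⟨hx1, hx2, hv⟩
      · rw [if_neg h]
        simp only [List.mem_cons]
        constructor
        · rintro (hs | hv)
          · exact Or.inl hs
          · exact Or.inr ⟨hv.1, hv.2.1, Or.inr hv.2.2⟩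
        · rintro (hs | ⟨hx1, hx2, (he | hv)⟩)
          · exact Or.inl hs
          · rw [List.cons.injEq, List.cons.injEq] at he
            exact absurd ⟨he.1.symm, by omega, by omega⟩ h
          · exact Or.inr ⟨hx1, hx2, hv⟩

theorem mem_coveredH (row col sl : Int) (values : List (List Int)) (x : Int) :
    x ∈ coveredH row col sl values ↔ 0 ≤ x ∧ x < sl ∧ [row, col + x] ∈ values := by
  rw [coveredH, mem_coveredH_aux]
  simp [PySem.Set.empty]

-- membership in coveredV
theorem mem_coveredV_aux (row col sl : Int) (values : List (List Int)) :
    ∀ (s : PySem.Set Int) (x : Int),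
      (x ∈ values.foldl (stepV row col sl) s ↔
        x ∈ s ∨ (0 ≤ x ∧ x < sl ∧ [row + x, col] ∈ values)) := by
  induction values with
  | nil => simp
  | cons v vs ih =>
    intro s x
    simp only [List.foldl_cons]
    rw [ih]
    match v with
    | [] => simp [stepV]
    | [a] => simp [stepV]
    | a :: b :: d :: t => simp [stepV]
    | [r, c] =>
      rw [show stepV row col sl s [r, c] =
        if c = col ∧ 0 ≤ r - row ∧ r - row < sl then PySem.Set.add s (r - row) else s from rfl]
      by_cases h : c = col ∧ 0 ≤ r - row ∧ r - row < sl
      · rw [if_pos h, PySem.Set.mem_add]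
        obtain ⟨h1, h2, h3⟩ := h
        subst h1
        simp only [List.mem_cons]
        constructor
        · rintro ((hs | he) | hv)
          · exact Or.inl hs
          · subst he; exact Or.inr ⟨h2, h3, Or.inl (by rw [show row + (r - row) = r by ring])⟩
          · exact Or.inr ⟨hv.1, hv.2.1, Or.inr hv.2.2⟩
        · rintro (hs | ⟨hx1, hx2, (he | hv)⟩)
          · exact Or.inl (Or.inl hs)
          · rw [List.cons.injEq, List.cons.injEq] at he
            exact Or.inl (Or.inr (by omega))
          · exact Or.inr ⟨hx1, hx2, hv⟩
      · rw [if_neg h]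
        simp only [List.mem_cons]
        constructor
        · rintro (hs | hv)
          · exact Or.inl hs
          · exact Or.inr ⟨hv.1, hv.2.1, Or.inr hv.2.2⟩
        · rintro (hs | ⟨hx1, hx2, (he | hv)⟩)
          · exact Or.inl hs
          · rw [List.cons.injEq, List.cons.injEq] at he
            exact absurd ⟨he.2.1.symm, by omega, by omega⟩ h
          · exact Or.inr ⟨hx1, hx2, hv⟩

theorem mem_coveredV (row col sl : Int) (values : List (List Int)) (x : Int) :
    x ∈ coveredV row col sl values ↔ 0 ≤ x ∧ x < sl ∧ [row + x, col] ∈ values := by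
  rw [coveredV, mem_coveredV_aux]
  simp [PySem.Set.empty]

-- the comprehension folds preserve Nodup (they only ever use Set.add)
theorem nodup_foldl_step (f : PySem.Set Int → List Int → PySem.Set Int)
    (hf : ∀ s v, s.Nodup → (f s v).Nodup) (values : List (List Int)) :
    ∀ s : PySem.Set Int, s.Nodup → (values.foldl f s).Nodup := by
  induction values with
  | nil => intro s hs; simpa using hs
  | cons v vs ih => intro s hs; exact ih _ (hf s v hs)

theorem nodup_stepH (row col sl : Int) (s : PySem.Set Int) (v : List Int) (hs : s.Nodup) :
    (stepH row col sl s v).Nodup := by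
  match v with
  | [] => exact hs
  | [a] => exact hs
  | a :: b :: d :: t => exact hs
  | [r, c] =>
    rw [show stepH row col sl s [r, c] =
      if r = row ∧ 0 ≤ c - col ∧ c - col < sl then PySem.Set.add s (c - col) else s from rfl]
    by_cases h : r = row ∧ 0 ≤ c - col ∧ c - col < sl
    · rw [if_pos h]; exact PySem.Set.nodup_add _ _ hs
    · rw [if_neg h]; exact hs

theorem nodup_stepV (row col sl : Int) (s : PySem.Set Int) (v : List Int) (hs : s.Nodup) :
    (stepV row col sl s v).Nodup := by
  match v with
  | [] => exact hs
  | [a] => exact hs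
  | a :: b :: d :: t => exact hs
  | [r, c] =>
    rw [show stepV row col sl s [r, c] =
      if c = col ∧ 0 ≤ r - row ∧ r - row < sl then PySem.Set.add s (r - row) else s from rfl]
    by_cases h : c = col ∧ 0 ≤ r - row ∧ r - row < sl
    · rw [if_pos h]; exact PySem.Set.nodup_add _ _ hs
    · rw [if_neg h]; exact hs

theorem nodup_coveredH (row col sl : Int) (values : List (List Int)) :
    (coveredH row col sl values).Nodup :=
  nodup_foldl_step _ (nodup_stepH row col sl) values PySem.Set.empty (by simp [PySem.Set.empty])

theorem nodup_coveredV (row col sl : Int) (values : List (List Int)) :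
    (coveredV row col sl values).Nodup :=
  nodup_foldl_step _ (nodup_stepV row col sl) values PySem.Set.empty (by simp [PySem.Set.empty])

-- a Nodup list of ints inside [0, sl) has length sl iff it contains every offset in [0, sl)
theorem length_eq_iff_full (s : List Int) (hs : s.Nodup) (sl : Int) (hsl : 0 < sl)
    (hsub : ∀ x ∈ s, 0 ≤ x ∧ x < sl) :
    ((s.length : Int) = sl ↔ ∀ i : Int, 0 ≤ i → i < sl → i ∈ s) := by
  have hsubF : s.toFinset ⊆ Finset.Ico 0 sl := by
    intro x hx
    rw [List.mem_toFinset] at hx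
    rw [Finset.mem_Ico]
    exact hsub x hx
  have hcard : s.toFinset.card = s.length := by
    rw [List.toFinset_card_of_nodup hs]
  have hIco : (Finset.Ico (0 : Int) sl).card = sl.toNat := by
    rw [Int.card_Ico]; simp
  constructor
  · intro hlen i h0 hi
    have hle : (Finset.Ico 0 sl).card ≤ s.toFinset.card := by
      rw [hcard, hIco]; omega
    have := Finset.eq_of_subset_of_card_le hsubF hle
    have : i ∈ s.toFinset := by rw [this, Finset.mem_Ico]; exact ⟨h0, hi⟩
    rwa [List.mem_toFinset] at this
  · intro hfull
    have hsup : Finset.Ico (0 : Int) sl ⊆ s.toFinset := by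
      intro i hi
      rw [Finset.mem_Ico] at hi
      rw [List.mem_toFinset]
      exact hfull i hi.1 hi.2
    have heq := Finset.Subset.antisymm hsubF hsup
    have := congrArg Finset.card heq
    rw [hcard, hIco] at this
    omega

-- B succeeds under exactly A's condition, for each orientation and ship_len sign
theorem alt_iff (row col ship_len : Int) (o : String) (co : List (String × List Int)) (dr dc : Int)
    (hd : (if PySem.Str.lower o = "h" then ((0 : Int), (1 : Int))
           else if PySem.Str.lower o = "v" then (1, 0) else (0, 0)) = (dr, dc)) :
    (is_in_the_board_alt row col ship_len o co = true ↔
      ∀ i ∈ List.range ship_len.toNat,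
        [row + dr * (i : Int), col + dc * (i : Int)] ∈ co.map Prod.snd) := by
  by_cases hsl : ship_len ≤ 0
  · have : ship_len.toNat = 0 := by omega
    simp [is_in_the_board_alt, hsl, this]
  · have hpos : 0 < ship_len := by omega
    simp only [is_in_the_board_alt, if_neg hsl]
    by_cases hh : PySem.Str.lower o = "h"
    · rw [if_pos hh] at hd ⊢
      rw [Prod.mk.injEq] at hd
      obtain ⟨e1, e2⟩ := hd; subst e1; subst e2
      rw [decide_eq_true_iff,
        length_eq_iff_full _ (nodup_coveredH row col ship_len (co.map Prod.snd)) ship_len hpos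
          (fun x hx => by
            have := (mem_coveredH row col ship_len (co.map Prod.snd) x).1 hx
            exact ⟨this.1, this.2.1⟩)]
      constructor
      · intro hfull i hi
        rw [List.mem_range] at hi
        have h0 : (0 : Int) ≤ (i : Int) := by positivity
        have h1 : (i : Int) < ship_len := by omega
        have := (mem_coveredH row col ship_len (co.map Prod.snd) (i : Int)).1 (hfull _ h0 h1)
        simpa using this.2.2
      · intro hall i h0 hi
        rw [mem_coveredH]
        refine ⟨h0, hi, ?_⟩
        have : i.toNat ∈ List.range ship_len.toNat := by rw [List.mem_range]; omega
        have := hall _ this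
        simpa [Int.toNat_of_nonneg h0] using this
    · rw [if_neg hh] at hd ⊢
      by_cases hv : PySem.Str.lower o = "v"
      · rw [if_pos hv] at hd ⊢
        rw [Prod.mk.injEq] at hd
        obtain ⟨e1, e2⟩ := hd; subst e1; subst e2
        rw [decide_eq_true_iff,
          length_eq_iff_full _ (nodup_coveredV row col ship_len (co.map Prod.snd)) ship_len hpos
            (fun x hx => by
              have := (mem_coveredV row col ship_len (co.map Prod.snd) x).1 hx
              exact ⟨this.1, this.2.1⟩)]
        constructor
        · intro hfull i hi
          rw [List.mem_range] at hi
          have h0 : (0 : Int) ≤ (i : Int) := by positivity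
          have h1 : (i : Int) < ship_len := by omega
          have := (mem_coveredV row col ship_len (co.map Prod.snd) (i : Int)).1 (hfull _ h0 h1)
          simpa using this.2.2
        · intro hall i h0 hi
          rw [mem_coveredV]
          refine ⟨h0, hi, ?_⟩
          have : i.toNat ∈ List.range ship_len.toNat := by rw [List.mem_range]; omega
          have := hall _ this
          simpa [Int.toNat_of_nonneg h0] using this
      · rw [if_neg hv] at hd ⊢
        rw [Prod.mk.injEq] at hd
        obtain ⟨e1, e2⟩ := hd; subst e1; subst e2
        have hne : ship_len.toNat ≠ 0 := by omega
        constructor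
        · intro hc i hi
          rw [List.contains_iff_mem] at hc
          simpa using hc
        · intro hall
          rw [List.contains_iff_mem]
          have : 0 ∈ List.range ship_len.toNat := by rw [List.mem_range]; omega
          simpa using hall 0 this

-- ===== VERDICT (by name: the statement is the Claim_ definition above) =====
theorem is_in_the_board_spec : Claim_equal_is_in_the_board := by
  intro row col ship_len o co _
  unfold Spec_is_in_the_board is_in_the_board
  have hA := aLoop_iff o co _ _ rfl ship_len.toNat row col
  have hB := alt_iff row col ship_len o co _ _ rfl
  have hiff := hA.trans hB.symm
  cases h1 : aLoop o co ship_len.toNat row col <;>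
    cases h2 : is_in_the_board_alt row col ship_len o co <;> simp_all
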